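-- pv_equiv track=rewrite | github.com/SteveMacenski/slam_toolbox | test/process_constraints.py | getSingleSets
-- ===== SOURCE A (Python) =====
-- def getSingleSets(lines):
--     measurements = []
--     measurement = []
--     for line in lines:
--         if line == "\n":
--             continue
--         if "UpdateMap: Vertex count:" in line:
--             measurements.append(measurement)
--             measurement = []
--         measurement.append(line)
--     return measurements[1:]
-- ===== SOURCE B (Python) =====
-- def getSingleSets(lines):
--     MARK = "UpdateMap: Vertex count:"
--     # find the index of the first marker line
--     i = 0
--     while i < len(lines) and MARK not in lines[i]:
--         i += 1
--     if i == len(lines):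
--         return []
--     groups = []
--     rest = lines[i:]          # rest always starts with a marker line
--     while rest:
--         head, tail = rest[0], rest[1:]
--         # length of the marker-free prefix of tail
--         k = 0
--         while k < len(tail) and MARK not in tail[k]:
--             k += 1
--         if k == len(tail):
--             break             # trailing open group: never emitted
--         groups.append([l for l in [head] + tail[:k] if l != "\n"])
--         rest = tail[k:]
--     return groups
-- ===== Notes on version B (the rewrite author's own statement) =====
-- stated objective: alternative
-- what changed: Instead of one pass that accumulates a current measurement and drops the first collected group at the end, B first scans to the first marker line and then repeatedly slices out the segment from one marker up to the next (filtering blank lines per segment), which makes the dropped pre-marker region and the dropped trailing open group explicit.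
import Mathlib
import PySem

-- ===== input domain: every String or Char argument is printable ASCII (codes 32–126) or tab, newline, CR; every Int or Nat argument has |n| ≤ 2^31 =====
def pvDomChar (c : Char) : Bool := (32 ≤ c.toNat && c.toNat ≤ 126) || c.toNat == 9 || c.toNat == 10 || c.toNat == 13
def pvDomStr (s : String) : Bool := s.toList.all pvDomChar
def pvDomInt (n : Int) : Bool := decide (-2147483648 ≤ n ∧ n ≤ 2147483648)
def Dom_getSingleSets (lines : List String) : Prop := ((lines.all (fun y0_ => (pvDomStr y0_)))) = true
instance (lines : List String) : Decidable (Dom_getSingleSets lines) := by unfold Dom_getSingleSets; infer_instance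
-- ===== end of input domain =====

-- B replaces A's single accumulate-and-drop-first pass by explicit marker-to-marker segmentation; alternative decomposition, same cost.

-- shared: the substring test '"UpdateMap: Vertex count:" in line'
def pvMark (l : String) : Bool := PySem.Str.isIn "UpdateMap: Vertex count:" l

-- ===== PORT A =====
-- the body of A's for-loop, on state (measurements, measurement)
def aStep (st : List (List String) × List String) (line : String) :
    List (List String) × List String :=
  if line = "\n" then st
  else
    let st := if pvMark line then (st.1 ++ [st.2], ([] : List String)) else st
    (st.1, st.2 ++ [line])

def getSingleSets (lines : List String) : List (List String) :=
  PySem.List.slice (lines.foldl aStep ([], [])).1 (some 1) none   -- measurements[1:]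

-- ===== PORT B =====
-- the 'k/i += 1 while no marker' while-loops of Source B: length of the marker-free prefix
def bScan : List String → Nat
  | [] => 0
  | l :: t => if pvMark l then 0 else bScan t + 1

-- the outer 'while rest:' loop of Source B, accumulating 'groups'; rest[1:], tail[:k], tail[k:]
-- with nonnegative Nat bounds are List.drop/List.take (PySem.List.slice_natCast)
def bChop (groups : List (List String)) (rest : List String) : List (List String) :=
  match rest with
  | [] => groups
  | head :: tail =>
    let k := bScan tail
    if k = tail.length then groups
    else bChop (groups ++ [(head :: tail.take k).filter (fun l => l != "\n")]) (tail.drop k)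
termination_by rest.length
decreasing_by simp

def getSingleSets_alt (lines : List String) : List (List String) :=
  let i := bScan lines
  if i = lines.length then [] else bChop [] (lines.drop i)

-- ===== PRECONDITION & SPEC =====
def Spec_getSingleSets (lines : List String) (out : List (List String)) : Prop := out = getSingleSets_alt lines
instance (lines : List String) (out : List (List String)) : Decidable (Spec_getSingleSets lines out) := by unfold Spec_getSingleSets; infer_instance

-- ===== CLAIM (what is proved, stated in full; the proofs are below) =====
def Claim_equal_getSingleSets : Prop := ∀ (lines : List String), Dom_getSingleSets lines → Spec_getSingleSets lines (getSingleSets lines)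

-- ===== LEMMAS AND PROOFS =====

-- recursive restatement of A's loop: groups emitted so far are prepended by the caller
def gsAux (cur : List String) : List String → List (List String)
  | [] => []
  | l :: ls =>
    if l = "\n" then gsAux cur ls
    else if pvMark l then cur :: gsAux [l] ls
    else gsAux (cur ++ [l]) ls

lemma pvMark_ne_nl {l : String} (h : pvMark l = true) : l ≠ "\n" := by
  rintro rfl; exact absurd h (by decide)

lemma foldl_aStep (ls : List String) : ∀ (ms : List (List String)) (cur : List String),
    (ls.foldl aStep (ms, cur)).1 = ms ++ gsAux cur ls := by
  induction ls with
  | nil => intro ms cur; simp [gsAux]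
  | cons l ls ih =>
    intro ms cur
    by_cases h1 : l = "\n"
    · simp [aStep, gsAux, h1, ih]
    · by_cases h2 : pvMark l
      · simp [aStep, gsAux, h1, h2, ih]
      · simp [aStep, gsAux, h1, h2, ih]

lemma bScan_le (t : List String) : bScan t ≤ t.length := by
  induction t with
  | nil => simp [bScan]
  | cons l t ih => simp only [bScan, List.length_cons]; split <;> omega

lemma headMarker_drop_bScan (t : List String) : ∀ (m : String) (t' : List String),
    t.drop (bScan t) = m :: t' → pvMark m = true := by
  induction t with
  | nil => intro m t' h; simp [bScan] at h
  | cons l t ih =>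
    intro m t' h
    by_cases hm : pvMark l
    · simp [bScan, hm] at h; rw [← h.1]; exact hm
    · simp only [bScan, hm] at h
      exact ih _ _ h

-- A's loop skips over the marker-free prefix, accumulating its non-blank lines into cur
lemma gsAux_skip : ∀ (t cur : List String),
    gsAux cur t
      = gsAux (cur ++ (t.take (bScan t)).filter (fun l => l != "\n")) (t.drop (bScan t)) := by
  intro t
  induction t with
  | nil => intro cur; simp [bScan]
  | cons l t ih =>
    intro cur
    by_cases hm : pvMark l
    · simp [bScan, hm]
    · have hstep : bScan (l :: t) = bScan t + 1 := by simp [bScan, hm]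
      rw [hstep, List.take_succ_cons, List.drop_succ_cons]
      by_cases h1 : l = "\n"
      · rw [show gsAux cur (l :: t) = gsAux cur t by simp [gsAux, h1], ih cur]
        congr 1
        simp [h1]
      · rw [show gsAux cur (l :: t) = gsAux (cur ++ [l]) t by simp [gsAux, h1, hm],
            ih (cur ++ [l])]
        congr 1
        simp [h1]

lemma bChop_nil (g : List (List String)) : bChop g [] = g := by
  rw [bChop]

lemma bChop_cons (g : List (List String)) (head : String) (tail : List String) :
    bChop g (head :: tail)
      = if bScan tail = tail.length then g
        else bChop (g ++ [(head :: tail.take (bScan tail)).filter (fun l => l != "\n")])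
               (tail.drop (bScan tail)) := by
  rw [bChop]

lemma bChop_acc : ∀ (n : Nat) (r : List String), r.length ≤ n → ∀ (g : List (List String)),
    bChop g r = g ++ bChop [] r := by
  intro n
  induction n with
  | zero =>
    intro r hr g
    have : r = [] := by cases r <;> simp_all
    subst this; simp [bChop_nil]
  | succ n ih =>
    intro r hr g
    match r with
    | [] => simp [bChop_nil]
    | head :: tail =>
      by_cases hk : bScan tail = tail.length
      · simp [bChop_cons, hk]
      · rw [bChop_cons, bChop_cons]
        simp only [hk, if_false]
        have hlen : (tail.drop (bScan tail)).length ≤ n := by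
          simp at hr ⊢; omega
        rw [ih _ hlen, ih _ hlen ([] ++ [(head :: tail.take (bScan tail)).filter (fun l => l != "\n")])]
        simp

-- main lemma: on a marker-headed (or empty) suffix, dropping the first emitted group of
-- A's loop yields exactly B's segment list
lemma gsAux_eq_bChop : ∀ (n : Nat) (rest : List String), rest.length ≤ n →
    (∀ m ∈ rest.head?, pvMark m = true) → ∀ (cur : List String),
    (gsAux cur rest).tail = bChop [] rest := by
  intro n
  induction n with
  | zero =>
    intro rest hr _ cur
    have : rest = [] := by cases rest <;> simp_all
    subst this; simp [gsAux, bChop_nil]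
  | succ n ih =>
    intro rest hr hhead cur
    match rest with
    | [] => simp [gsAux, bChop_nil]
    | m :: t =>
      have hm : pvMark m = true := hhead m (by simp)
      have hmn : m ≠ "\n" := pvMark_ne_nl hm
      have h1 : gsAux cur (m :: t) = cur :: gsAux [m] t := by
        simp [gsAux, hmn, hm]
      rw [h1, List.tail_cons]
      rw [gsAux_skip t [m]]
      rcases hdw : t.drop (bScan t) with _ | ⟨m', t'⟩
      · -- no further marker: A emits nothing more, B takes the 'k == len(tail)' branch
        have hk : bScan t = t.length := by
          have h2 := bScan_le t
          have h3 := List.drop_eq_nil_iff.mp hdw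
          omega
        simp [gsAux, bChop_cons, hk]
      · have hm' : pvMark m' = true := headMarker_drop_bScan t m' t' hdw
        have hm'n : m' ≠ "\n" := pvMark_ne_nl hm'
        have hk : bScan t ≠ t.length := by
          intro h
          rw [h, List.drop_length] at hdw
          simp at hdw
        have h2 : gsAux ([m] ++ (t.take (bScan t)).filter (fun l => l != "\n")) (m' :: t')
            = ([m] ++ (t.take (bScan t)).filter (fun l => l != "\n")) :: gsAux [m'] t' := by
          simp [gsAux, hm'n, hm']
        rw [h2]
        rw [bChop_cons]
        simp only [hk, if_false, hdw]
        rw [bChop_acc (m' :: t').length _ le_rfl]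
        congr 1
        · simp [hmn]
        · -- recurse: gsAux [m'] t' = bChop [] (m' :: t')
          have hlen : (m' :: t').length ≤ n := by
            have h3 : (t.drop (bScan t)).length ≤ t.length := by simp
            rw [hdw] at h3
            simp at hr h3 ⊢
            omega
          have h5 := ih (m' :: t') hlen (by simp [hm']) [m']
          have h4 : gsAux [m'] (m' :: t') = [m'] :: gsAux [m'] t' := by
            simp [gsAux, hm'n, hm']
          rw [h4, List.tail_cons] at h5
          exact h5

-- ===== VERDICT (by name: the statement is the Claim_ definition above) =====
theorem getSingleSets_spec : Claim_equal_getSingleSets := by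
  intro lines _
  unfold Spec_getSingleSets getSingleSets getSingleSets_alt
  rw [PySem.List.slice_from_one, foldl_aStep lines [] [], List.nil_append, gsAux_skip lines []]
  have hmain := gsAux_eq_bChop (lines.drop (bScan lines)).length (lines.drop (bScan lines))
      le_rfl (by
        intro m hm
        rcases h : lines.drop (bScan lines) with _ | ⟨m', t'⟩
        · rw [h] at hm; simp at hm
        · rw [h] at hm; simp at hm
          exact hm ▸ headMarker_drop_bScan lines m' t' h)
      ((lines.take (bScan lines)).filter (fun l => l != "\n"))
  rw [List.nil_append, hmain]
  by_cases hi : bScan lines = lines.length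
  · simp [hi, bChop_nil]
  · simp [hi]
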